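-- pv_equiv track=rewrite | github.com/bejarrodar/Jump | Week 8/test.py | solve
-- ===== SOURCE A (Python) =====
-- def find_opposite(s, e):
--     for each in s:
--         if each == e:
--             return True
--     return False
--
-- def solve(s):
--     start = ["[", "(", "{"]
--     end = ["]", ")", "}"]
--     for i in range(len(s)):  # get each char
--         for j in range(len(start)):
--             if s[i] == start[j]:  # compare each char to start chars
--                 found = find_opposite(s[i : len(s)], end[j])
--                 if not found:
--                     return "false"
--             if s[i] == end[j]:  # compare each char to start chars
--                 found = find_opposite(s[0:i], start[j])
--                 if not found:
--                     return "false"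
--     return "true"
-- ===== SOURCE B (Python) =====
-- def solve(s):
--     # One pass with counters: seen_* = openers seen so far, rem_* = closers not yet passed.
--     rem_sq = s.count("]")
--     rem_par = s.count(")")
--     rem_br = s.count("}")
--     seen_sq = seen_par = seen_br = 0
--     for ch in s:
--         if ch == "[":
--             if rem_sq == 0:
--                 return "false"
--             seen_sq += 1
--         elif ch == "]":
--             if seen_sq == 0:
--                 return "false"
--             rem_sq -= 1
--         elif ch == "(":
--             if rem_par == 0:
--                 return "false"
--             seen_par += 1
--         elif ch == ")":
--             if seen_par == 0:
--                 return "false"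
--             rem_par -= 1
--         elif ch == "{":
--             if rem_br == 0:
--                 return "false"
--             seen_br += 1
--         elif ch == "}":
--             if seen_br == 0:
--                 return "false"
--             rem_br -= 1
--     return "true"
-- ===== Notes on version B (the rewrite author's own statement) =====
-- stated objective: faster
-- what changed: Replaces the per-bracket linear scan of a slice (find_opposite over s[i:] / s[:i]) by a single left-to-right pass maintaining seen-opener and remaining-closer counters per bracket type, with closer totals precomputed once.
import Mathlib
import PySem

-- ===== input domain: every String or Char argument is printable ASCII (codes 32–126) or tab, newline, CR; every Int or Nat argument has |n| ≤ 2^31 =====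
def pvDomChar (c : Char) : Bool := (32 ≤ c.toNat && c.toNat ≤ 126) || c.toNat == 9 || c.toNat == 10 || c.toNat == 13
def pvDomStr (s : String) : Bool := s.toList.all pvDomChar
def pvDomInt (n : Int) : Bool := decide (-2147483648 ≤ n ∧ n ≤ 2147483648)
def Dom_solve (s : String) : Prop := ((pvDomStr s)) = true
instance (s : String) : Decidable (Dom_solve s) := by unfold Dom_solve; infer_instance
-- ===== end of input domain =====

-- B replaces A's per-bracket rescans of slices by one pass with per-type counters (O(n) vs O(n^2)).

-- ===== PORT A =====
-- find_opposite: linear scan with early return True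
def find_opposite : List Char → Char → Bool
  | [], _ => false
  | c :: rest, e => if c == e then true else find_opposite rest e

-- inner loop: for j in range(len(start)) over the parallel lists start/end, zipped
def solveInner (l : List Char) (i : Nat) : List (Char × Char) → Bool
  | [] => true
  | (st, en) :: rest =>
    let c := l.getD i ' '
    if c == st && !(find_opposite (l.drop i) en) then false
    else if c == en && !(find_opposite (l.take i) st) then false
    else solveInner l i rest

-- outer loop: for i in range(len(s)); Bool false models the early `return "false"`
def solveOuter (l : List Char) : List Nat → Bool
  | [] => true
  | i :: rest =>
    if solveInner l i [('[', ']'), ('(', ')'), ('{', '}')] then solveOuter l rest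
    else false

def solve (s : String) : String :=
  if solveOuter s.toList (List.range s.toList.length) then "true" else "false"

-- ===== PORT B =====
-- one pass; rs/rp/rb = remaining closers, ss/sp/sb = openers seen so far
def solveBLoop : List Char → Nat → Nat → Nat → Nat → Nat → Nat → Bool
  | [], _, _, _, _, _, _ => true
  | c :: t, rs, rp, rb, ss, sp, sb =>
    if c == '[' then (if rs == 0 then false else solveBLoop t rs rp rb (ss + 1) sp sb)
    else if c == ']' then (if ss == 0 then false else solveBLoop t (rs - 1) rp rb ss sp sb)
    else if c == '(' then (if rp == 0 then false else solveBLoop t rs rp rb ss (sp + 1) sb)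
    else if c == ')' then (if sp == 0 then false else solveBLoop t rs (rp - 1) rb ss sp sb)
    else if c == '{' then (if rb == 0 then false else solveBLoop t rs rp rb ss sp (sb + 1))
    else if c == '}' then (if sb == 0 then false else solveBLoop t rs rp (rb - 1) ss sp sb)
    else solveBLoop t rs rp rb ss sp sb

def solve_alt (s : String) : String :=
  let l := s.toList
  if solveBLoop l (l.count ']') (l.count ')') (l.count '}') 0 0 0 then "true" else "false"

-- ===== PRECONDITION & SPEC =====
def Spec_solve (s : String) (out : String) : Prop := out = solve_alt s
instance (s : String) (out : String) : Decidable (Spec_solve s out) := by unfold Spec_solve; infer_instance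

-- ===== CLAIM (what is proved, stated in full; the proofs are below) =====
def Claim_equal_solve : Prop := ∀ (s : String), Dom_solve s → Spec_solve s (solve s)

-- ===== LEMMAS AND PROOFS =====

theorem find_opposite_eq_contains (l : List Char) (e : Char) :
    find_opposite l e = l.contains e := by
  induction l with
  | nil => rfl
  | cons c t ih =>
    by_cases h : c = e
    · simp [find_opposite, h]
    · simp [find_opposite, ih, h]
      exact fun he => absurd he.symm h

theorem count_eq_zero_iff_not_contains (l : List Char) (e : Char) :
    (l.count e == 0) = !(l.contains e) := by
  induction l with
  | nil => rfl
  | cons c t ih =>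
    by_cases h : c = e
    · subst h; simp [List.count_cons]
    · simpa [List.count_cons, h, Ne.symm h] using ih

theorem main_invariant (t p : List Char) :
    solveOuter (p ++ t) (List.range' p.length t.length) =
      solveBLoop t (t.count ']') (t.count ')') (t.count '}')
        (p.count '[') (p.count '(') (p.count '{') := by
  induction t generalizing p with
  | nil => simp [solveOuter, solveBLoop]
  | cons c t' ih =>
    have hget : (p ++ c :: t').getD p.length ' ' = c := by
      simp [List.getD, List.getElem?_append_right (Nat.le_refl p.length)]
    have hdrop : (p ++ c :: t').drop p.length = c :: t' := by
      simp
    have htake : (p ++ c :: t').take p.length = p := by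
      simp
    have hre : List.range' p.length (c :: t').length = p.length :: List.range' (p.length + 1) t'.length := by
      simp [List.range'_succ]
    rw [hre]
    have happ : p ++ c :: t' = (p ++ [c]) ++ t' := by simp
    rw [show solveOuter (p ++ c :: t') (p.length :: List.range' (p.length + 1) t'.length) =
          (if solveInner (p ++ c :: t') p.length [('[', ']'), ('(', ')'), ('{', '}')] then
            solveOuter (p ++ c :: t') (List.range' (p.length + 1) t'.length) else false) from rfl]
    have houter : solveOuter (p ++ c :: t') (List.range' (p.length + 1) t'.length) =
        solveBLoop t' (t'.count ']') (t'.count ')') (t'.count '}')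
          ((p ++ [c]).count '[') ((p ++ [c]).count '(') ((p ++ [c]).count '{') := by
      have := ih (p ++ [c])
      rw [happ]
      simpa using this
    by_cases h1 : c = '['
    · subst h1
      simp [solveInner, hget, hdrop, htake, find_opposite_eq_contains, solveBLoop,
        count_eq_zero_iff_not_contains, List.count_cons, List.count_append, houter]
    · by_cases h2 : c = ']'
      · subst h2
        simp [solveInner, hget, hdrop, htake, find_opposite_eq_contains, solveBLoop,
          count_eq_zero_iff_not_contains, List.count_cons, List.count_append, houter]
      · by_cases h3 : c = '('
        · subst h3
          simp [solveInner, hget, hdrop, htake, find_opposite_eq_contains, solveBLoop,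
            count_eq_zero_iff_not_contains, List.count_cons, List.count_append, houter]
        · by_cases h4 : c = ')'
          · subst h4
            simp [solveInner, hget, hdrop, htake, find_opposite_eq_contains, solveBLoop,
              count_eq_zero_iff_not_contains, List.count_cons, List.count_append, houter]
          · by_cases h5 : c = '{'
            · subst h5
              simp [solveInner, hget, hdrop, htake, find_opposite_eq_contains, solveBLoop,
                count_eq_zero_iff_not_contains, List.count_cons, List.count_append, houter]
            · by_cases h6 : c = '}'
              · subst h6
                simp [solveInner, hget, hdrop, htake, find_opposite_eq_contains, solveBLoop,
                  count_eq_zero_iff_not_contains, List.count_cons, List.count_append, houter]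
              · simp [solveInner, hget, solveBLoop, h1, h2, h3, h4, h5, h6,
                  List.count_cons, List.count_append, houter]

-- ===== VERDICT (by name: the statement is the Claim_ definition above) =====
theorem solve_spec : Claim_equal_solve := by
  intro s _
  unfold Spec_solve solve solve_alt
  have h := main_invariant s.toList []
  simp only [List.nil_append, List.length_nil, List.count_nil] at h
  rw [List.range_eq_range']
  simp only [h]
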